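-- pv_equiv track=rewrite | github.com/G9000/animaOS | apps/server/src/anima_server/services/agent/output_filter.py | _longest_partial_suffix
-- ===== SOURCE A (Python) =====
-- def _longest_partial_suffix(text: str, markers: tuple[str, ...]) -> str:
--     lowered = text.lower()
--     max_length = min(len(text), max(len(marker) for marker in markers))
--
--     for suffix_length in range(max_length, 0, -1):
--         suffix = lowered[-suffix_length:]
--         if any(marker.startswith(suffix) for marker in markers):
--             return text[-suffix_length:]
--     return ""
-- ===== SOURCE B (Python) =====
-- def _longest_partial_suffix(text: str, markers: tuple[str, ...]) -> str:
--     lowered = text.lower()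
--     best = 0
--     for marker in markers:
--         for k in range(min(len(text), len(marker)), 0, -1):
--             if lowered.endswith(marker[:k]):
--                 if k > best:
--                     best = k
--                 break
--     return text[-best:] if best > 0 else ""
-- ===== Notes on version B (the rewrite author's own statement) =====
-- stated objective: alternative
-- what changed: Inverts the loop nesting: instead of scanning suffix lengths outermost and asking 'does any marker start with this suffix' with an early return, B scans each marker once, finds that marker's longest matching prefix length by testing text.lower().endswith(marker[:k]), and keeps a running max over markers, slicing once at the end.
import Mathlib
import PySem

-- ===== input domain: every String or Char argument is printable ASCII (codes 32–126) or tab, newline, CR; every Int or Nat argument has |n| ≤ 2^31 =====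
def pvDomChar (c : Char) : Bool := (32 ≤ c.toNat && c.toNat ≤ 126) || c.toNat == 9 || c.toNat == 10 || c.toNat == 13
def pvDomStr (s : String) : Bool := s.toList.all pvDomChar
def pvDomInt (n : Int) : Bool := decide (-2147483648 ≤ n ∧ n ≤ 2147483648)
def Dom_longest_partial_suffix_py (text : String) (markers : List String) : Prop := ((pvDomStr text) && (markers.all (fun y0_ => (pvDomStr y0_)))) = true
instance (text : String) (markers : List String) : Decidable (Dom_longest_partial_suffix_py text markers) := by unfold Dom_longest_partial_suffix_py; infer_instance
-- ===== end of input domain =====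

-- B inverts the loop nesting: per-marker longest matching prefix length via endswith, combined by a running max (alternative decomposition, same cost).

-- ===== PORT A =====
-- the for-loop 'for suffix_length in range(max_length, 0, -1)': current suffix_length is k+1
def pyLoopA (text : String) (lowered : String) (markers : List String) : Nat → String
  | 0 => ""
  | Nat.succ k =>
    if markers.any (fun marker => PySem.Str.startswith marker (PySem.Str.slice lowered (some (-((k + 1 : Nat) : Int))) none)) then
      PySem.Str.slice text (some (-((k + 1 : Nat) : Int))) none
    else pyLoopA text lowered markers k

def longest_partial_suffix_py (text : String) (markers : List String) : String :=
  match markers with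
  | [] => ""   -- Python raises ValueError here (max() of an empty generator); excluded by Pre_
  | m0 :: rest =>
    let lowered := PySem.Str.lower text
    let maxMarker := rest.foldl (fun a m => max a (PySem.Str.len m)) (PySem.Str.len m0)
    let maxLength := min (PySem.Str.len text) maxMarker
    pyLoopA text lowered (m0 :: rest) maxLength.toNat

-- ===== PORT B =====
-- the inner 'for k in range(min(len(text), len(marker)), 0, -1): … break': current k is k+1
def bestForMarker (lowered : String) (marker : String) : Nat → Nat
  | 0 => 0
  | Nat.succ k =>
    if PySem.Str.endswith lowered (PySem.Str.slice marker none (some ((k + 1 : Nat) : Int))) then k + 1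
    else bestForMarker lowered marker k

def longest_partial_suffix_py_alt (text : String) (markers : List String) : String :=
  let lowered := PySem.Str.lower text
  let best := markers.foldl
    (fun best marker => max best (bestForMarker lowered marker (min (PySem.Str.len text) (PySem.Str.len marker)).toNat)) 0
  if best > 0 then PySem.Str.slice text (some (-(best : Int))) none else ""

-- ===== PRECONDITION & SPEC =====
-- Pre_ excludes only the empty markers tuple, on which Python A raises ValueError (max() of an empty generator).
def Pre_longest_partial_suffix_py (text : String) (markers : List String) : Prop := markers ≠ []
instance (text : String) (markers : List String) : Decidable (Pre_longest_partial_suffix_py text markers) := by unfold Pre_longest_partial_suffix_py; infer_instance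
def pvWitness_longest_partial_suffix_py : String × List String := ("Hello <to", ["<tool>", "</end>"])

def Spec_longest_partial_suffix_py (text : String) (markers : List String) (out : String) : Prop := out = longest_partial_suffix_py_alt text markers
instance (text : String) (markers : List String) (out : String) : Decidable (Spec_longest_partial_suffix_py text markers out) := by unfold Spec_longest_partial_suffix_py; infer_instance

-- ===== CLAIM (what is proved, stated in full; the proofs are below) =====
def Claim_equal_longest_partial_suffix_py : Prop := ∀ (text : String) (markers : List String), Dom_longest_partial_suffix_py text markers → Pre_longest_partial_suffix_py text markers → Spec_longest_partial_suffix_py text markers (longest_partial_suffix_py text markers)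

-- ===== LEMMAS AND PROOFS =====

-- 'greatest j in [1..k] satisfying p, else 0': the common skeleton of both descending scans
def gLoop (p : Nat → Bool) : Nat → Nat
  | 0 => 0
  | Nat.succ k => if p (k + 1) then k + 1 else gLoop p k

theorem gLoop_le (p : Nat → Bool) (k : Nat) : gLoop p k ≤ k := by
  induction k with
  | zero => simp [gLoop]
  | succ k ih =>
    simp only [gLoop]
    split <;> omega

theorem gLoop_congr (p q : Nat → Bool) (k : Nat) (h : ∀ j, 1 ≤ j → j ≤ k → p j = q j) :
    gLoop p k = gLoop q k := by
  induction k with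
  | zero => rfl
  | succ k ih =>
    simp only [gLoop]
    rw [h (k + 1) (by omega) (by omega)]
    rw [ih (fun j h1 h2 => h j h1 (by omega))]

theorem gLoop_shrink (p : Nat → Bool) (k1 k2 : Nat) (hk : k1 ≤ k2)
    (h : ∀ j, k1 < j → j ≤ k2 → p j = false) : gLoop p k2 = gLoop p k1 := by
  induction k2 with
  | zero =>
    have h0 : k1 = 0 := by omega
    rw [h0]
  | succ k ih =>
    rcases Nat.lt_or_ge k1 (k + 1) with hlt | hge
    · simp only [gLoop]
      rw [h (k + 1) (by omega) (by omega)]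
      simp only [Bool.false_eq_true, if_false]
      exact ih (by omega) (fun j a b => h j a (by omega))
    · have h1 : k1 = k + 1 := by omega
      rw [h1]

theorem gLoop_false (k : Nat) : gLoop (fun _ => false) k = 0 := by
  induction k with
  | zero => rfl
  | succ k ih => simpa [gLoop] using ih

theorem gLoop_or (p q : Nat → Bool) (k : Nat) :
    gLoop (fun j => p j || q j) k = max (gLoop p k) (gLoop q k) := by
  induction k with
  | zero => rfl
  | succ k ih =>
    simp only [gLoop]
    by_cases hp : p (k + 1) = true
    · by_cases hq : q (k + 1) = true
      · simp [hp, hq]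
      · have := gLoop_le q k
        simp [hp, hq]
        omega
    · by_cases hq : q (k + 1) = true
      · have := gLoop_le p k
        simp [hp, hq]
        omega
      · simp [hp, hq, ih]

theorem foldl_max_acc {α : Type} (g : α → Nat) (l : List α) (a : Nat) :
    l.foldl (fun b m => max b (g m)) a = max a (l.foldl (fun b m => max b (g m)) 0) := by
  induction l generalizing a with
  | nil => simp
  | cons m t ih =>
    simp only [List.foldl_cons]
    rw [ih, ih (max 0 (g m))]
    omega

theorem gLoop_any_eq_fold {α : Type} (l : List α) (p : α → Nat → Bool) (N : Nat) :
    gLoop (fun j => l.any (fun m => p m j)) N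
      = l.foldl (fun b m => max b (gLoop (p m) N)) 0 := by
  induction l with
  | nil => simpa using gLoop_false N
  | cons m t ih =>
    have h1 : gLoop (fun j => (m :: t).any fun x => p x j) N
        = max (gLoop (p m) N) (gLoop (fun j => t.any fun x => p x j) N) := by
      rw [← gLoop_or]
      apply gLoop_congr
      intro j _ _
      simp
    rw [h1, ih, List.foldl_cons,
        foldl_max_acc (fun x => gLoop (p x) N) t (max 0 (gLoop (p m) N))]
    omega

-- pyLoopA computes gLoop of its 'any' predicate, then slices
theorem pyLoopA_eq (text lowered : String) (markers : List String) (k : Nat) :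
    pyLoopA text lowered markers k
      = (let r := gLoop (fun j => markers.any (fun marker =>
            PySem.Str.startswith marker (PySem.Str.slice lowered (some (-(j : Int))) none))) k
         if r = 0 then "" else PySem.Str.slice text (some (-(r : Int))) none) := by
  induction k with
  | zero => rfl
  | succ k ih =>
    simp only [pyLoopA, gLoop]
    split
    · simp
    · exact ih

theorem bestForMarker_eq (lowered marker : String) (k : Nat) :
    bestForMarker lowered marker k
      = gLoop (fun j => PySem.Str.endswith lowered (PySem.Str.slice marker none (some (j : Int)))) k := by
  induction k with
  | zero => rfl
  | succ k ih => simp only [bestForMarker, gLoop, ih]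

-- the pointwise bridge: for 1 ≤ j ≤ len(text),
-- 'marker.startswith(lowered[-j:])'  =  'j ≤ len(marker) && lowered.endswith(marker[:j])'
theorem startswith_endswith_bridge (text marker : String) (j : Nat)
    (h1 : 1 ≤ j) (h2 : j ≤ text.toList.length) :
    PySem.Str.startswith marker (PySem.Str.slice (PySem.Str.lower text) (some (-(j : Int))) none)
      = (decide (j ≤ marker.toList.length)
          && PySem.Str.endswith (PySem.Str.lower text) (PySem.Str.slice marker none (some (j : Int)))) := by
  have hL : (PySem.Str.lower text).toList.length = text.toList.length := by
    rw [PySem.Str.toList_lower]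
    simp [PySem.Chars.lower]
  rw [PySem.Str.startswith_eq, PySem.Str.endswith_eq]
  rw [PySem.Str.toList_slice, PySem.Str.toList_slice]
  rw [PySem.Chars.slice_eq_listSlice, PySem.Chars.slice_eq_listSlice]
  rw [PySem.List.slice_from_neg_natCast _ _ (by omega)]
  rw [PySem.List.slice_to_natCast]
  set L := (PySem.Str.lower text).toList with hLdef
  set M := marker.toList with hMdef
  rw [Bool.eq_iff_iff]
  simp only [Bool.and_eq_true, decide_eq_true_eq,
    PySem.Chars.startswith_iff, PySem.Chars.endswith_iff]
  constructor
  · intro h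
    have hlen : (L.drop (L.length - j)).length = j := by
      simp [List.length_drop]
      omega
    have hjM : j ≤ M.length := by
      have := h.length_le
      omega
    refine ⟨hjM, ?_⟩
    have htake : L.drop (L.length - j) = M.take j := by
      have := List.prefix_iff_eq_take.mp h
      rw [hlen] at this
      exact this
    rw [← htake]
    exact List.drop_suffix _ _
  · rintro ⟨hjM, hsuf⟩
    have hlen : (M.take j).length = j := by
      simp [List.length_take]
      omega
    have heq : M.take j = L.drop (L.length - j) := by
      have := List.suffix_iff_eq_drop.mp hsuf
      rw [hlen] at this
      exact this
    rw [← heq]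
    exact List.take_prefix _ _

-- per-marker: scanning the guarded predicate up to any N between min(len text, len marker)
-- and len text equals B's inner loop bounded by min(len text, len marker)
theorem perMarker_extend (text marker : String) (N : Nat)
    (hN1 : min text.toList.length marker.toList.length ≤ N) (hN2 : N ≤ text.toList.length) :
    gLoop (fun j => decide (j ≤ marker.toList.length)
        && PySem.Str.endswith (PySem.Str.lower text) (PySem.Str.slice marker none (some (j : Int)))) N
      = bestForMarker (PySem.Str.lower text) marker
          (min (PySem.Str.len text) (PySem.Str.len marker)).toNat := by
  have hK : (min (PySem.Str.len text) (PySem.Str.len marker)).toNat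
      = min text.toList.length marker.toList.length := by
    simp only [PySem.Str.len_eq]
    omega
  rw [bestForMarker_eq, hK]
  rw [gLoop_shrink _ (min text.toList.length marker.toList.length) N hN1 ?_]
  · apply gLoop_congr
    intro j hj1 hj2
    have hg : j ≤ marker.toList.length := by omega
    rw [decide_eq_true hg, Bool.true_and]
  · intro j hlt hle
    have hg : ¬ (j ≤ marker.toList.length) := by omega
    rw [decide_eq_false hg, Bool.false_and]

theorem main_eq (text : String) (markers : List String) (h : markers ≠ []) :
    longest_partial_suffix_py text markers = longest_partial_suffix_py_alt text markers := by
  match markers with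
  | [] => exact absurd rfl h
  | m0 :: rest =>
    simp only [longest_partial_suffix_py, longest_partial_suffix_py_alt]
    set maxMarker := rest.foldl (fun a m => max a (PySem.Str.len m)) (PySem.Str.len m0) with hmm
    have hmax : ∀ m ∈ m0 :: rest, PySem.Str.len m ≤ maxMarker := by
      intro m hm
      have hfold : maxMarker = (rest.map PySem.Str.len).foldl max (PySem.Str.len m0) := by
        rw [hmm, List.foldl_map]
      rcases List.mem_cons.mp hm with h0 | hr
      · rw [h0, hfold]
        exact (PySem.List.le_foldl_max _ _).1
      · rw [hfold]
        exact (PySem.List.le_foldl_max _ _).2 _ (List.mem_map_of_mem hr)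
    have hmm0 : (0 : Int) ≤ maxMarker := by
      have := hmax m0 (List.mem_cons_self)
      have h0 : (0 : Int) ≤ PySem.Str.len m0 := by rw [PySem.Str.len_eq]; omega
      omega
    set N := (min (PySem.Str.len text) maxMarker).toNat with hN
    have hNle : N ≤ text.toList.length := by
      rw [hN]
      have := PySem.Str.len_eq text
      omega
    rw [pyLoopA_eq]
    -- rewrite A's predicate into the guarded endswith form
    have hpred : gLoop (fun j => (m0 :: rest).any (fun marker =>
          PySem.Str.startswith marker (PySem.Str.slice (PySem.Str.lower text) (some (-(j : Int))) none))) N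
        = gLoop (fun j => (m0 :: rest).any (fun marker =>
          decide (j ≤ marker.toList.length)
            && PySem.Str.endswith (PySem.Str.lower text) (PySem.Str.slice marker none (some (j : Int))))) N := by
      apply gLoop_congr
      intro j hj1 hj2
      apply congrArg (List.any (m0 :: rest))
      funext marker
      exact startswith_endswith_bridge text marker j hj1 (by omega)
    rw [hpred, gLoop_any_eq_fold]
    have hfold2 : (m0 :: rest).foldl (fun b m => max b (gLoop (fun j => decide (j ≤ m.toList.length)
          && PySem.Str.endswith (PySem.Str.lower text) (PySem.Str.slice m none (some (j : Int)))) N)) 0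
        = (m0 :: rest).foldl (fun best marker => max best (bestForMarker (PySem.Str.lower text) marker
            (min (PySem.Str.len text) (PySem.Str.len marker)).toNat)) 0 := by
      apply PySem.List.foldl_congr_mem
      intro acc m hm
      rw [perMarker_extend text m N ?_ hNle]
      have hmlen := hmax m hm
      have ht := PySem.Str.len_eq text
      have hme := PySem.Str.len_eq m
      rw [hN]
      omega
    rw [hfold2]
    set best := (m0 :: rest).foldl (fun best marker => max best (bestForMarker (PySem.Str.lower text) marker
        (min (PySem.Str.len text) (PySem.Str.len marker)).toNat)) 0 with hbest
    by_cases hb : best = 0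
    · simp [hb]
    · simp only [if_neg hb, if_pos (by omega : best > 0)]

-- ===== VERDICT (by name: the statement is the Claim_ definition above) =====
theorem longest_partial_suffix_py_spec : Claim_equal_longest_partial_suffix_py := by
  intro text markers _ hpre
  unfold Spec_longest_partial_suffix_py
  exact main_eq text markers hpre
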